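-- pv_equiv track=rewrite | github.com/drbh/uvnote | uvnote/generator.py | split_uv_install_logs
-- ===== SOURCE A (Python) =====
-- from typing import Dict, List, Tuple
--
-- def split_uv_install_logs(stderr: str) -> Tuple[str, str]:
--     """Split stderr into UV install logs and regular stderr.
--
--     Returns:
--         (uv_install_logs, regular_stderr)
--     """
--     lines = stderr.split('\n')
--     uv_logs = []
--     regular_logs = []
--     in_uv_section = True
--
--     for line in lines:
--         if in_uv_section:
--             uv_logs.append(line)
--             # Check if we've reached the end of UV install logs
--             if line.startswith('Installed '):
--                 in_uv_section = False
--         else: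
--             regular_logs.append(line)
--
--     # If we never found "Installed", treat it all as regular stderr
--     if in_uv_section:
--         return "", stderr
--
--     return '\n'.join(uv_logs), '\n'.join(regular_logs).strip()
-- ===== SOURCE B (Python) =====
-- def split_uv_install_logs(stderr: str):
--     """Split stderr into UV install logs and regular stderr."""
--     lines = stderr.split('\n')
--     i = next((k for k, line in enumerate(lines)
--               if line.startswith('Installed ')), None)
--     if i is None:
--         return "", stderr
--     return '\n'.join(lines[:i + 1]), '\n'.join(lines[i + 1:]).strip()
-- ===== Notes on version B (the rewrite author's own statement) =====
-- stated objective: simpler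
-- what changed: Replaces the boolean-flag dual-accumulator loop with locate-the-first-'Installed '-line then slice-and-join.
import Mathlib
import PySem

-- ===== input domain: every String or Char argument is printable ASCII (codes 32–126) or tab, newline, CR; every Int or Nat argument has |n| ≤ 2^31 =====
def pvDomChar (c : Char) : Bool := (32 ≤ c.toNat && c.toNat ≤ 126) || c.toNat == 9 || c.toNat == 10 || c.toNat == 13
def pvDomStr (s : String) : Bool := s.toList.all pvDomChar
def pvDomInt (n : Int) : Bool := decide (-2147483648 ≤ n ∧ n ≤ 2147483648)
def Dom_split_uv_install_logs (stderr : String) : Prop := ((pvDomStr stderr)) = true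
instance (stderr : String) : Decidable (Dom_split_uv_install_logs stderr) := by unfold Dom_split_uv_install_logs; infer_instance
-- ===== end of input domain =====

-- B replaces A's boolean-flag dual-accumulator loop with locate-the-split-line-then-slice (objective: simpler).

-- ===== PORT A =====
-- the for-loop over lines with state (uv_logs, regular_logs, in_uv_section)
def pvLoopA (lines uv reg : List String) (flag : Bool) : List String × List String × Bool :=
  match lines with
  | [] => (uv, reg, flag)
  | l :: rest =>
    if flag then
      if PySem.Str.startswith l "Installed " then pvLoopA rest (uv ++ [l]) reg false
      else pvLoopA rest (uv ++ [l]) reg true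
    else pvLoopA rest uv (reg ++ [l]) flag

def split_uv_install_logs (stderr : String) : String × String :=
  let lines := (PySem.Str.split? stderr "\n").getD []  -- sep "\n" ≠ "", so split? = some: exact
  let r := pvLoopA lines [] [] true
  if r.2.2 then ("", stderr)
  else (PySem.Str.join "\n" r.1, PySem.Str.strip (PySem.Str.join "\n" r.2.1))

-- ===== PORT B =====
def split_uv_install_logs_alt (stderr : String) : String × String :=
  let lines := (PySem.Str.split? stderr "\n").getD []  -- sep "\n" ≠ "", so split? = some: exact
  -- next((k for k, line in enumerate(lines) if line.startswith('Installed ')), None)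
  match List.findIdx? (fun l => PySem.Str.startswith l "Installed ") lines with
  | none => ("", stderr)
  -- lines[:i+1] / lines[i+1:] with nonnegative in-range bound = take / drop (exact)
  | some i => (PySem.Str.join "\n" (List.take (i + 1) lines),
               PySem.Str.strip (PySem.Str.join "\n" (List.drop (i + 1) lines)))

-- ===== PRECONDITION & SPEC =====
def Spec_split_uv_install_logs (stderr : String) (out : String × String) : Prop := out = split_uv_install_logs_alt stderr
instance (stderr : String) (out : String × String) : Decidable (Spec_split_uv_install_logs stderr out) := by unfold Spec_split_uv_install_logs; infer_instance

-- ===== CLAIM (what is proved, stated in full; the proofs are below) =====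
def Claim_equal_split_uv_install_logs : Prop := ∀ (stderr : String), Dom_split_uv_install_logs stderr → Spec_split_uv_install_logs stderr (split_uv_install_logs stderr)

-- ===== LEMMAS AND PROOFS =====

theorem pvLoopA_false (lines uv reg : List String) :
    pvLoopA lines uv reg false = (uv, reg ++ lines, false) := by
  induction lines generalizing reg with
  | nil => simp [pvLoopA]
  | cons l rest ih =>
    rw [show pvLoopA (l :: rest) uv reg false = pvLoopA rest uv (reg ++ [l]) false from rfl, ih]
    simp

theorem pvLoopA_true (lines uv reg : List String) :
    pvLoopA lines uv reg true =
      match List.findIdx? (fun l => PySem.Str.startswith l "Installed ") lines with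
      | none => (uv ++ lines, reg, true)
      | some i => (uv ++ List.take (i + 1) lines, reg ++ List.drop (i + 1) lines, false) := by
  induction lines generalizing uv with
  | nil => simp [pvLoopA]
  | cons l rest ih =>
    rw [List.findIdx?_cons,
      show pvLoopA (l :: rest) uv reg true
          = (if PySem.Str.startswith l "Installed " then pvLoopA rest (uv ++ [l]) reg false
             else pvLoopA rest (uv ++ [l]) reg true) from rfl]
    by_cases h : PySem.Str.startswith l "Installed " = true
    · rw [if_pos h, if_pos h, pvLoopA_false]
      simp
    · rw [if_neg h, if_neg h, ih]
      cases hf : List.findIdx? (fun l => PySem.Str.startswith l "Installed ") rest with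
      | none => simp
      | some i => simp

-- ===== VERDICT (by name: the statement is the Claim_ definition above) =====
theorem split_uv_install_logs_spec : Claim_equal_split_uv_install_logs := by
  intro stderr _
  unfold Spec_split_uv_install_logs split_uv_install_logs split_uv_install_logs_alt
  simp only [pvLoopA_true]
  cases hf : List.findIdx? (fun l => PySem.Str.startswith l "Installed ")
      ((PySem.Str.split? stderr "\n").getD []) with
  | none => simp
  | some i => simp
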